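-- pv_equiv track=rewrite | github.com/hnanth/rg_id | get_interacting_domains_v2.py | max_consecutive_overlap
-- ===== SOURCE A (Python) =====
-- def max_consecutive_overlap(seq1, seq2):
--     max_len = 0
--     max_interacting_residues = 0
--
--     for shift in range(-len(seq2)+1, len(seq1)):
--         current_len = 0
--         current_interacting_residues = 0
--         for i in range(len(seq1)):
--             j = i - shift
--             if 0 <= j < len(seq2):
--                 if seq1[i] != "-" and seq2[j] != "-":
--                     if seq1[i] == seq2[j]:
--                         current_len += 1
--                         current_interacting_residues += 1
--                     elif seq1[i].upper() == seq2[j] or seq1[i] == "?": # add to overlap if one base is ? or one is lower case but same letter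
--                         current_len += 1
--                         max_len = max(max_len, current_len)
--                     else:
--                         current_len = 0 # reset streak on mismatch
--                         current_interacting_residues = 0
--                 elif (seq1[i] == "-" or seq2[j] == "-") and current_len >= 2:
--                     current_len += 1
--                 else:
--                     current_len = 0 # reset streak on mismatch
--                     current_interacting_residues = 0
--
--                 max_len = max(max_len, current_len)
--                 max_interacting_residues = max(max_interacting_residues, current_interacting_residues)
--             else:
--                 current_len = 0 # reset streack on mismatch or gap
--                 current_interacting_residues = 0
--     return max_len, max_interacting_residues
-- ===== SOURCE B (Python) =====
-- def max_consecutive_overlap(seq1, seq2):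
--     # Dynamic programming over the full (i, j) grid with a rolling previous-row
--     # array: the streak ending at cell (i, j) depends only on cell (i-1, j-1),
--     # so one row-major pass replaces A's loop over every diagonal shift.
--     best_len = 0
--     best_res = 0
--     prev = [(0, 0)] * len(seq2)
--     for a in seq1:
--         cur = []
--         diag = (0, 0)  # value of prev[j-1], i.e. the streak at (i-1, j-1)
--         for j, b in enumerate(seq2):
--             cl, ci = diag
--             diag = prev[j]
--             if a != "-" and b != "-":
--                 if a == b:
--                     cl, ci = cl + 1, ci + 1
--                 elif a.upper() == b or a == "?":
--                     cl += 1
--                 else: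
--                     cl, ci = 0, 0
--             elif cl >= 2:
--                 cl += 1
--             else:
--                 cl, ci = 0, 0
--             cur.append((cl, ci))
--             if cl > best_len:
--                 best_len = cl
--             if ci > best_res:
--                 best_res = ci
--         prev = cur
--     return best_len, best_res
-- ===== Notes on version B (the rewrite author's own statement) =====
-- stated objective: alternative
-- what changed: B replaces A's loop over every diagonal shift (each re-scanning all of seq1) by a single row-major dynamic-programming pass over the (i,j) grid with a rolling previous-row array of streak states, as in the classic longest-common-substring DP.
import Mathlib
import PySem

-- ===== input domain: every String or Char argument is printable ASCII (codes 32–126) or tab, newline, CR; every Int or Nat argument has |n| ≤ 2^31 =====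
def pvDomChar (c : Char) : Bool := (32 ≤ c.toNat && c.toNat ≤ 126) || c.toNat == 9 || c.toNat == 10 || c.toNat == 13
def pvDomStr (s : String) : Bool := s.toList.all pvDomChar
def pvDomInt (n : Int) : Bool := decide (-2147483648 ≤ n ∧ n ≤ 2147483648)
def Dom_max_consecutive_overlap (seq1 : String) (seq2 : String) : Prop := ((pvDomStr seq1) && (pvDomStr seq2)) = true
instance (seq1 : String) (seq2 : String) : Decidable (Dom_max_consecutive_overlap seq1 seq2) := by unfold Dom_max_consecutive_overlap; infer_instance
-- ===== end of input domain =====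

-- B replaces A's per-shift diagonal scans by one row-major DP pass over the (i,j) grid
-- with a rolling previous-row array (longest-common-substring style); same results.

-- ===== PORT A =====
-- inner-loop body of A: state (max_len, max_interacting, current_len, current_interacting), index i
def pvStepA (s1 s2 : List Char) (shift : Int) (st : Int × Int × Int × Int) (i : Int) :
    Int × Int × Int × Int :=
  let ml := st.1; let mi := st.2.1; let cl := st.2.2.1; let ci := st.2.2.2
  let j := i - shift
  if 0 ≤ j ∧ j < (s2.length : Int) then
    let a := PySem.List.pyGetD s1 i ' '
    let b := PySem.List.pyGetD s2 j ' '
    if a ≠ '-' ∧ b ≠ '-' then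
      if a = b then (max ml (cl + 1), max mi (ci + 1), cl + 1, ci + 1)
      else if PySem.Chars.upperChar a = b ∨ a = '?' then (max ml (cl + 1), max mi ci, cl + 1, ci)
      else (max ml 0, max mi 0, 0, 0)
    else if (a = '-' ∨ b = '-') ∧ 2 ≤ cl then (max ml (cl + 1), max mi ci, cl + 1, ci)
    else (max ml 0, max mi 0, 0, 0)
  else (ml, mi, 0, 0)

def max_consecutive_overlap (seq1 : String) (seq2 : String) : Int × Int :=
  let s1 := seq1.toList
  let s2 := seq2.toList
  (PySem.List.pyRange (-(s2.length : Int) + 1) (s1.length : Int) 1).foldl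
    (fun acc shift =>
      let st := (PySem.List.pyRange 0 (s1.length : Int) 1).foldl
        (pvStepA s1 s2 shift) (acc.1, acc.2, 0, 0)
      (st.1, st.2.1)) ((0 : Int), (0 : Int))

-- ===== PORT B =====
-- inner-loop body of B: state (cur, diag, best_len, best_res), enumerated pair (j, b)
def pvStepB (prev : List (Int × Int)) (a : Char)
    (st : List (Int × Int) × (Int × Int) × Int × Int) (p : Int × Char) :
    List (Int × Int) × (Int × Int) × Int × Int :=
  let cur := st.1; let diag := st.2.1; let bl := st.2.2.1; let bi := st.2.2.2
  let j := p.1; let b := p.2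
  let cl := diag.1; let ci := diag.2
  let diag' := PySem.List.pyGetD prev j ((0 : Int), (0 : Int))
  let c : Int × Int :=
    if a ≠ '-' ∧ b ≠ '-' then
      if a = b then (cl + 1, ci + 1)
      else if PySem.Chars.upperChar a = b ∨ a = '?' then (cl + 1, ci)
      else (0, 0)
    else if 2 ≤ cl then (cl + 1, ci)
    else (0, 0)
  (cur ++ [c], diag', if bl < c.1 then c.1 else bl, if bi < c.2 then c.2 else bi)

def max_consecutive_overlap_alt (seq1 : String) (seq2 : String) : Int × Int :=
  let s2 := seq2.toList
  let fin := seq1.toList.foldl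
    (fun acc a =>
      let st := (PySem.List.enumerate s2 0).foldl (pvStepB acc.2.2 a)
        ([], ((0 : Int), (0 : Int)), acc.1, acc.2.1)
      (st.2.2.1, st.2.2.2, st.1))
    ((0 : Int), (0 : Int), List.replicate s2.length ((0 : Int), (0 : Int)))
  (fin.1, fin.2.1)

-- ===== PRECONDITION & SPEC =====
def Spec_max_consecutive_overlap (seq1 : String) (seq2 : String) (out : Int × Int) : Prop := out = max_consecutive_overlap_alt seq1 seq2
instance (seq1 : String) (seq2 : String) (out : Int × Int) : Decidable (Spec_max_consecutive_overlap seq1 seq2 out) := by unfold Spec_max_consecutive_overlap; infer_instance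

-- ===== CLAIM (what is proved, stated in full; the proofs are below) =====
def Claim_equal_max_consecutive_overlap : Prop := ∀ (seq1 : String) (seq2 : String), Dom_max_consecutive_overlap seq1 seq2 → Spec_max_consecutive_overlap seq1 seq2 (max_consecutive_overlap seq1 seq2)

-- ===== LEMMAS AND PROOFS =====

-- the streak transition both programs apply at an aligned cell
def pvTrans (a b : Char) (s : Int × Int) : Int × Int :=
  if a ≠ '-' ∧ b ≠ '-' then
    if a = b then (s.1 + 1, s.2 + 1)
    else if PySem.Chars.upperChar a = b ∨ a = '?' then (s.1 + 1, s.2)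
    else (0, 0)
  else if 2 ≤ s.1 then (s.1 + 1, s.2)
  else (0, 0)

-- streak state (current_len, current_interacting) at grid cell (i, j)
def pvCell (s1 s2 : List Char) : Nat → Nat → Int × Int
  | 0, j => pvTrans (s1.getD 0 ' ') (s2.getD j ' ') (0, 0)
  | i+1, 0 => pvTrans (s1.getD (i+1) ' ') (s2.getD 0 ' ') (0, 0)
  | i+1, j+1 => pvTrans (s1.getD (i+1) ' ') (s2.getD (j+1) ' ') (pvCell s1 s2 i j)

-- streak of the previous row at column j ((0,0) for row 0)
def pvP (s1 s2 : List Char) (i j : Nat) : Int × Int :=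
  match i with
  | 0 => (0, 0)
  | i'+1 => pvCell s1 s2 i' j

-- the diagonal predecessor streak fed into cell (i, j)
def pvDg (s1 s2 : List Char) (i j : Nat) : Int × Int :=
  match j with
  | 0 => (0, 0)
  | j'+1 => pvP s1 s2 i j'

def pvMax2 (b c : Int × Int) : Int × Int := (max b.1 c.1, max b.2 c.2)

-- the cells of one diagonal (shift), in scan order
def pvDiag (s1 s2 : List Char) (shift : Int) : List (Int × Int) :=
  let lo := max 0 shift
  let hi := min (s1.length : Int) (shift + (s2.length : Int))
  (List.range (hi - lo).toNat).map
    (fun k => pvCell s1 s2 (lo.toNat + k) ((lo - shift).toNat + k))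

def pvRow (s1 s2 : List Char) (i : Nat) : List (Int × Int) :=
  (List.range s2.length).map (pvCell s1 s2 i)

def pvRows (s1 s2 : List Char) : Nat → Nat → List (Int × Int)
  | _, 0 => []
  | i, fuel+1 => pvRow s1 s2 i ++ pvRows s1 s2 (i+1) fuel

def pvPrevRow (s1 s2 : List Char) : Nat → List (Int × Int)
  | 0 => List.replicate s2.length ((0 : Int), (0 : Int))
  | i+1 => (List.range s2.length).map (pvCell s1 s2 i)

theorem pvCell_eq (s1 s2 : List Char) (i j : Nat) :
    pvCell s1 s2 i j = pvTrans (s1.getD i ' ') (s2.getD j ' ') (pvDg s1 s2 i j) := by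
  cases i <;> cases j <;> simp [pvCell, pvP, pvDg]

theorem pvStepA_dead (s1 s2 : List Char) (shift i : Int) (st : Int × Int × Int × Int)
    (h : ¬(0 ≤ i - shift ∧ i - shift < (s2.length : Int))) :
    pvStepA s1 s2 shift st i = (st.1, st.2.1, 0, 0) := by
  simp only [pvStepA, if_neg h]

theorem foldA_dead_proj (s1 s2 : List Char) (shift : Int) (l : List Int)
    (h : ∀ i ∈ l, ¬(0 ≤ i - shift ∧ i - shift < (s2.length : Int))) :
    ∀ st : Int × Int × Int × Int,
      ((l.foldl (pvStepA s1 s2 shift) st).1, (l.foldl (pvStepA s1 s2 shift) st).2.1)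
        = (st.1, st.2.1) := by
  induction l with
  | nil => intro st; rfl
  | cons x xs ih =>
    intro st
    have hx := h x (List.mem_cons_self)
    simp only [List.foldl_cons, pvStepA_dead s1 s2 shift x st hx]
    exact ih (fun i hi => h i (List.mem_cons_of_mem _ hi)) (st.1, st.2.1, 0, 0)

theorem foldA_dead_reset (s1 s2 : List Char) (shift : Int) (l : List Int) (ml mi : Int)
    (h : ∀ i ∈ l, ¬(0 ≤ i - shift ∧ i - shift < (s2.length : Int))) :
    l.foldl (pvStepA s1 s2 shift) (ml, mi, 0, 0) = (ml, mi, 0, 0) := by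
  induction l with
  | nil => rfl
  | cons x xs ih =>
    have hx := h x (List.mem_cons_self)
    simp only [List.foldl_cons, pvStepA_dead s1 s2 shift x _ hx]
    exact ih (fun i hi => h i (List.mem_cons_of_mem _ hi))

-- an in-window A step applies pvTrans and folds the new streak into the maxima
theorem pvStepA_live (s1 s2 : List Char) (shift i : Int) (st : Int × Int × Int × Int)
    (h : 0 ≤ i - shift ∧ i - shift < (s2.length : Int)) :
    pvStepA s1 s2 shift st i
      = (max st.1 (pvTrans (PySem.List.pyGetD s1 i ' ') (PySem.List.pyGetD s2 (i - shift) ' ') (st.2.2.1, st.2.2.2)).1,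
         max st.2.1 (pvTrans (PySem.List.pyGetD s1 i ' ') (PySem.List.pyGetD s2 (i - shift) ' ') (st.2.2.1, st.2.2.2)).2,
         pvTrans (PySem.List.pyGetD s1 i ' ') (PySem.List.pyGetD s2 (i - shift) ' ') (st.2.2.1, st.2.2.2)) := by
  simp only [pvStepA, pvTrans, if_pos h]
  by_cases hab : PySem.List.pyGetD s1 i ' ' ≠ '-' ∧ PySem.List.pyGetD s2 (i - shift) ' ' ≠ '-'
  · simp only [if_pos hab]
    by_cases h1 : PySem.List.pyGetD s1 i ' ' = PySem.List.pyGetD s2 (i - shift) ' '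
    · simp [if_pos h1]
    · by_cases h2 : PySem.Chars.upperChar (PySem.List.pyGetD s1 i ' ') = PySem.List.pyGetD s2 (i - shift) ' '
        ∨ PySem.List.pyGetD s1 i ' ' = '?'
      · simp [if_neg h1, if_pos h2]
      · simp [if_neg h1, if_neg h2]
  · have hor : PySem.List.pyGetD s1 i ' ' = '-' ∨ PySem.List.pyGetD s2 (i - shift) ' ' = '-' := by
      rw [not_and_or] at hab
      rcases hab with h' | h' <;> simp_all
    by_cases hcl : 2 ≤ st.2.2.1
    · simp only [if_neg hab, if_pos (And.intro hor hcl), if_pos hcl]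
    · simp only [if_neg hab, if_neg (fun hh : _ ∧ _ => hcl hh.2), if_neg hcl]

-- the window of one shift, scanned by A, computes the max-fold of that diagonal's cells
theorem foldA_window (s1 s2 : List Char) (shift lo : Int) (i0 j0 : Nat)
    (hlo0 : 0 ≤ lo) (hi0 : i0 = lo.toNat) (hj0 : j0 = (lo - shift).toNat)
    (hsh : shift = (i0 : Int) - (j0 : Int)) (hz : i0 = 0 ∨ j0 = 0) :
    ∀ (t : Nat), (i0 + t ≤ s1.length) → (j0 + t ≤ s2.length) → ∀ (ml mi : Int),
    (PySem.List.pyRange lo (lo + t) 1).foldl (pvStepA s1 s2 shift) (ml, mi, 0, 0)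
      = ((((List.range t).map (fun k => pvCell s1 s2 (i0 + k) (j0 + k))).foldl pvMax2 (ml, mi)).1,
         (((List.range t).map (fun k => pvCell s1 s2 (i0 + k) (j0 + k))).foldl pvMax2 (ml, mi)).2,
         (match t with | 0 => ((0 : Int), (0 : Int)) | t'+1 => pvCell s1 s2 (i0 + t') (j0 + t'))) := by
  have hloi : lo = (i0 : Int) := by omega
  have hjs : lo - shift = (j0 : Int) := by omega
  intro t
  induction t with
  | zero =>
    intro h1 h2 ml mi
    rw [show lo + ((0 : Nat) : Int) = lo by push_cast; ring,
      PySem.List.pyRange_one_eq_nil (le_refl lo)]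
    rfl
  | succ t ih =>
    intro h1 h2 ml mi
    have h1' : i0 + t ≤ s1.length := by omega
    have h2' : j0 + t ≤ s2.length := by omega
    rw [show lo + ((t + 1 : Nat) : Int) = (lo + (t : Int)) + 1 by push_cast; ring,
      PySem.List.pyRange_one_succ_right (by omega), List.foldl_append, ih h1' h2' ml mi]
    simp only [List.foldl_cons, List.foldl_nil]
    have hwin : 0 ≤ (lo + (t : Int)) - shift ∧ (lo + (t : Int)) - shift < (s2.length : Int) := by
      omega
    rw [pvStepA_live s1 s2 shift (lo + (t : Int)) _ hwin]
    have e1 : PySem.List.pyGetD s1 (lo + (t : Int)) ' ' = s1.getD (i0 + t) ' ' := by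
      rw [PySem.List.pyGetD_of_nonneg s1 ' ' (by omega)]
      congr 1
      omega
    have e2 : PySem.List.pyGetD s2 ((lo + (t : Int)) - shift) ' ' = s2.getD (j0 + t) ' ' := by
      rw [PySem.List.pyGetD_of_nonneg s2 ' ' (by omega)]
      congr 1
      omega
    have hc : pvTrans (s1.getD (i0 + t) ' ') (s2.getD (j0 + t) ' ')
        (match t with | 0 => ((0 : Int), (0 : Int)) | t'+1 => pvCell s1 s2 (i0 + t') (j0 + t'))
        = pvCell s1 s2 (i0 + t) (j0 + t) := by
      rw [pvCell_eq s1 s2 (i0 + t) (j0 + t)]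
      congr 1
      cases t with
      | zero =>
        rcases hz with hz | hz
        · subst hz
          cases j0 with
          | zero => rfl
          | succ j' => simp [pvDg, pvP]
        · subst hz; rfl
      | succ t' => simp [pvDg, pvP]
    simp only [e1, e2]
    rw [List.range_succ, List.map_append, List.foldl_append]
    simp only [List.map_cons, List.map_nil, List.foldl_cons, List.foldl_nil]
    rw [← hc]
    cases t <;> simp [pvMax2]

-- per shift: A's full scan of seq1 projects to the max-fold of the diagonal's cells
theorem foldA_shift (s1 s2 : List Char) (shift : Int)
    (hlow : -(s2.length : Int) + 1 ≤ shift) (hhigh : shift < (s1.length : Int)) (ml mi : Int) :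
    (((PySem.List.pyRange 0 (s1.length : Int) 1).foldl (pvStepA s1 s2 shift) (ml, mi, 0, 0)).1,
     ((PySem.List.pyRange 0 (s1.length : Int) 1).foldl (pvStepA s1 s2 shift) (ml, mi, 0, 0)).2.1)
      = (pvDiag s1 s2 shift).foldl pvMax2 (ml, mi) := by
  have hn : ((s1.length : Int)) = (s1.length : Int) := rfl
  set n : Int := (s1.length : Int) with hndef
  set m : Int := (s2.length : Int) with hmdef
  set lo : Int := max 0 shift with hlodef
  set hi : Int := min n (shift + m) with hhidef
  have hlo1 : lo = 0 ∨ lo = shift := max_choice 0 shift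
  have hlo2 : (0 : Int) ≤ lo ∧ shift ≤ lo := ⟨le_max_left _ _, le_max_right _ _⟩
  have hhi1 : hi = n ∨ hi = shift + m := min_choice n (shift + m)
  have hhi2 : hi ≤ n ∧ hi ≤ shift + m := ⟨min_le_left _ _, min_le_right _ _⟩
  have hlohi : lo ≤ hi := by rcases hlo1 with h | h <;> rcases hhi1 with h' | h' <;> omega
  rw [PySem.List.pyRange_one_append 0 lo n hlo2.1 (by omega), List.foldl_append,
      PySem.List.pyRange_one_append lo hi n hlohi hhi2.1, List.foldl_append]
  rw [foldA_dead_reset s1 s2 shift _ ml mi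
    (by intro i hmem; rw [PySem.List.mem_pyRange_one] at hmem
        rcases hlo1 with h | h <;> omega)]
  rw [foldA_dead_proj s1 s2 shift _
    (by intro i hmem; rw [PySem.List.mem_pyRange_one] at hmem
        rcases hhi1 with h | h <;> omega)]
  have hhieq : lo + (((hi - lo).toNat : Nat) : Int) = hi := by omega
  have hwin := foldA_window s1 s2 shift lo lo.toNat (lo - shift).toNat hlo2.1 rfl rfl
    (by omega)
    (by rcases hlo1 with h | h
        · exact Or.inl (by omega)
        · exact Or.inr (by omega))
    (hi - lo).toNat (by omega) (by omega) ml mi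
  rw [hhieq] at hwin
  rw [hwin]
  simp only [pvDiag]
  rfl

-- folding window-folds over shifts is the fold over the concatenation
theorem foldl_pvMax2_flat {α : Type} (g : α → List (Int × Int)) (l : List α) :
    ∀ init : Int × Int,
    l.foldl (fun acc x => (g x).foldl pvMax2 acc) init = (l.flatMap g).foldl pvMax2 init := by
  induction l with
  | nil => intro init; rfl
  | cons x xs ih => intro init; simp only [List.foldl_cons, List.flatMap_cons, List.foldl_append]; exact ih _

-- a B step appends the transformed streak and folds it into the maxima
theorem pvStepB_eq (prev : List (Int × Int)) (a : Char)
    (st : List (Int × Int) × (Int × Int) × Int × Int) (p : Int × Char) :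
    pvStepB prev a st p
      = (st.1 ++ [pvTrans a p.2 st.2.1], PySem.List.pyGetD prev p.1 ((0 : Int), (0 : Int)),
         max st.2.2.1 (pvTrans a p.2 st.2.1).1, max st.2.2.2 (pvTrans a p.2 st.2.1).2) := by
  have hmax : ∀ x y : Int, (if x < y then y else x) = max x y := by intro x y; omega
  simp only [pvStepB, pvTrans, hmax]

-- one row of B's DP
theorem foldB_row (s1 s2 : List Char) (i : Nat) (prev : List (Int × Int)) (a : Char)
    (ha : a = s1.getD i ' ')
    (hprev : ∀ j : Nat, j < s2.length → PySem.List.pyGetD prev (j : Int) ((0 : Int), (0 : Int)) = pvP s1 s2 i j) :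
    ∀ (t : Nat), t ≤ s2.length → ∀ (bl bi : Int),
    (((List.range t).map (fun (j : Nat) => ((j : Int), s2.getD j ' '))).foldl (pvStepB prev a)
        ([], ((0 : Int), (0 : Int)), bl, bi))
      = ((List.range t).map (pvCell s1 s2 i),
         pvDg s1 s2 i t,
         (((List.range t).map (pvCell s1 s2 i)).foldl pvMax2 (bl, bi)).1,
         (((List.range t).map (pvCell s1 s2 i)).foldl pvMax2 (bl, bi)).2) := by
  subst ha
  intro t
  induction t with
  | zero => intro ht bl bi; rfl
  | succ t ih =>
    intro ht bl bi
    rw [List.range_succ, List.map_append, List.foldl_append, ih (by omega) bl bi]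
    simp only [List.map_cons, List.map_nil, List.foldl_cons, List.foldl_nil]
    rw [pvStepB_eq]
    have hc : pvTrans (s1.getD i ' ') (s2.getD t ' ') (pvDg s1 s2 i t)
        = pvCell s1 s2 i t := (pvCell_eq s1 s2 i t).symm
    rw [hprev t (by omega)]
    simp only [List.map_append, List.map_cons, List.map_nil, List.foldl_append,
      List.foldl_cons, List.foldl_nil, pvMax2]
    rw [hc]
    rfl

-- B's outer loop over the remaining rows
theorem foldB_rows (s1 s2 : List Char) :
    ∀ (rest : List Char) (i : Nat), s1.drop i = rest → i + rest.length = s1.length →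
    ∀ (bl bi : Int),
    rest.foldl
      (fun acc a =>
        let st := (PySem.List.enumerate s2 0).foldl (pvStepB acc.2.2 a)
          ([], ((0 : Int), (0 : Int)), acc.1, acc.2.1)
        (st.2.2.1, st.2.2.2, st.1)) (bl, bi, pvPrevRow s1 s2 i)
      = (((pvRows s1 s2 i rest.length).foldl pvMax2 (bl, bi)).1,
         ((pvRows s1 s2 i rest.length).foldl pvMax2 (bl, bi)).2,
         pvPrevRow s1 s2 (i + rest.length)) := by
  intro rest
  induction rest with
  | nil => intro i hdrop hlen bl bi; simp [pvRows]
  | cons a rest ih =>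
    intro i hdrop hlen bl bi
    have hlen' : i + 1 + rest.length = s1.length := by
      simp only [List.length_cons] at hlen; omega
    have hdrop' : s1.drop (i + 1) = rest := by
      rw [← List.tail_drop, hdrop]
      rfl
    have h0 : s1[i]? = some a := by
      have h := congrArg (fun l => l[0]?) hdrop
      simpa [List.getElem?_drop] using h
    have ha : a = s1.getD i ' ' := by
      rw [List.getD_eq_getElem?_getD, h0]
      rfl
    have hprev : ∀ j : Nat, j < s2.length →
        PySem.List.pyGetD (pvPrevRow s1 s2 i) (j : Int) ((0 : Int), (0 : Int)) = pvP s1 s2 i j := by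
      intro j hj
      cases i with
      | zero => simp [pvPrevRow, pvP, List.getD_eq_getElem?_getD, hj]
      | succ i' =>
        simp [pvPrevRow, pvP, List.getD_eq_getElem?_getD, hj]
    have henum : PySem.List.enumerate s2 0
        = (List.range s2.length).map (fun (j : Nat) => ((j : Int), s2.getD j ' ')) := by
      rw [PySem.List.enumerate_eq_map_pyRange s2 ' ', PySem.List.pyRange_one, List.map_map]
      rw [show (PySem.List.len s2 - 0).toNat = s2.length by
        rw [PySem.List.len_eq]; omega]
      apply List.map_congr_left
      intro k hk
      simp
    have hbody : (fun (acc : Int × Int × List (Int × Int)) (a : Char) =>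
        let st := (PySem.List.enumerate s2 0).foldl (pvStepB acc.2.2 a)
          ([], ((0 : Int), (0 : Int)), acc.1, acc.2.1)
        ((st.2.2.1, st.2.2.2, st.1) : Int × Int × List (Int × Int)))
          (bl, bi, pvPrevRow s1 s2 i) a
        = (((pvRow s1 s2 i).foldl pvMax2 (bl, bi)).1,
           ((pvRow s1 s2 i).foldl pvMax2 (bl, bi)).2,
           pvPrevRow s1 s2 (i + 1)) := by
      simp only [henum]
      simp only [foldB_row s1 s2 i (pvPrevRow s1 s2 i) a ha hprev s2.length (le_refl _)]
      rfl
    simp only [List.foldl_cons, hbody,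
      ih (i + 1) hdrop' hlen'
        ((pvRow s1 s2 i).foldl pvMax2 (bl, bi)).1 ((pvRow s1 s2 i).foldl pvMax2 (bl, bi)).2]
    simp only [List.length_cons, pvRows, List.foldl_append]
    rw [show i + (rest.length + 1) = i + 1 + rest.length by omega]

-- max-fold only depends on membership
theorem foldl_max_eq_of_mem_iff (l1 l2 : List Int) (h : ∀ x, x ∈ l1 ↔ x ∈ l2) (a : Int) :
    l1.foldl max a = l2.foldl max a := by
  apply le_antisymm
  · rcases PySem.List.foldl_max_mem l1 a with h1 | h1
    · rw [h1]; exact (PySem.List.le_foldl_max l2 a).1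
    · exact (PySem.List.le_foldl_max l2 a).2 _ ((h _).1 h1)
  · rcases PySem.List.foldl_max_mem l2 a with h1 | h1
    · rw [h1]; exact (PySem.List.le_foldl_max l1 a).1
    · exact (PySem.List.le_foldl_max l1 a).2 _ ((h _).2 h1)

theorem foldl_pvMax2_split (l : List (Int × Int)) :
    ∀ init : Int × Int,
    l.foldl pvMax2 init = ((l.map Prod.fst).foldl max init.1, (l.map Prod.snd).foldl max init.2) := by
  induction l with
  | nil => intro init; rfl
  | cons x xs ih => intro init; simp only [List.foldl_cons, List.map_cons, ih, pvMax2]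

theorem foldl_pvMax2_eq_of_mem_iff (l1 l2 : List (Int × Int))
    (h : ∀ x, x ∈ l1 ↔ x ∈ l2) (init : Int × Int) :
    l1.foldl pvMax2 init = l2.foldl pvMax2 init := by
  rw [foldl_pvMax2_split, foldl_pvMax2_split]
  have hf : ∀ x, x ∈ l1.map Prod.fst ↔ x ∈ l2.map Prod.fst := by
    intro x
    constructor <;> (intro hx; rcases List.mem_map.1 hx with ⟨p, hp, rfl⟩)
    · exact List.mem_map.2 ⟨p, (h p).1 hp, rfl⟩
    · exact List.mem_map.2 ⟨p, (h p).2 hp, rfl⟩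
  have hs : ∀ x, x ∈ l1.map Prod.snd ↔ x ∈ l2.map Prod.snd := by
    intro x
    constructor <;> (intro hx; rcases List.mem_map.1 hx with ⟨p, hp, rfl⟩)
    · exact List.mem_map.2 ⟨p, (h p).1 hp, rfl⟩
    · exact List.mem_map.2 ⟨p, (h p).2 hp, rfl⟩
  rw [foldl_max_eq_of_mem_iff _ _ hf, foldl_max_eq_of_mem_iff _ _ hs]

theorem mem_pvRows (s1 s2 : List Char) :
    ∀ (fuel i : Nat) (p : Int × Int),
      p ∈ pvRows s1 s2 i fuel ↔ ∃ k j, k < fuel ∧ j < s2.length ∧ p = pvCell s1 s2 (i + k) j := by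
  intro fuel
  induction fuel with
  | zero => intro i p; simp [pvRows]
  | succ f ih =>
    intro i p
    simp only [pvRows, List.mem_append, pvRow, List.mem_map, List.mem_range, ih]
    constructor
    · rintro (⟨j, hj, rfl⟩ | ⟨k, j, hk, hj, hp⟩)
      · exact ⟨0, j, by omega, hj, by simp⟩
      · exact ⟨k + 1, j, by omega, hj, by rw [hp, show i + (k + 1) = i + 1 + k by omega]⟩
    · rintro ⟨k, j, hk, hj, hp⟩
      cases k with
      | zero => exact Or.inl ⟨j, hj, by simp [hp]⟩
      | succ k' =>
        exact Or.inr ⟨k', j, by omega, hj, by rw [hp, show i + (k' + 1) = i + 1 + k' by omega]⟩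

theorem mem_diags (s1 s2 : List Char) (p : Int × Int) :
    p ∈ (PySem.List.pyRange (-(s2.length : Int) + 1) (s1.length : Int) 1).flatMap (pvDiag s1 s2)
      ↔ ∃ i j, i < s1.length ∧ j < s2.length ∧ p = pvCell s1 s2 i j := by
  rw [List.mem_flatMap]
  constructor
  · rintro ⟨shift, hsh, hp⟩
    rw [PySem.List.mem_pyRange_one] at hsh
    simp only [pvDiag, List.mem_map, List.mem_range] at hp
    obtain ⟨k, hk, rfl⟩ := hp
    rcases max_choice 0 shift with h | h <;>
      rcases min_choice ((s1.length : Int)) (shift + (s2.length : Int)) with h' | h' <;>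
      exact ⟨(max 0 shift).toNat + k, ((max 0 shift) - shift).toNat + k, by omega, by omega, rfl⟩
  · rintro ⟨i, j, hi, hj, rfl⟩
    refine ⟨(i : Int) - (j : Int), by rw [PySem.List.mem_pyRange_one]; omega, ?_⟩
    simp only [pvDiag, List.mem_map, List.mem_range]
    refine ⟨min i j, ?_, ?_⟩
    · rcases max_choice 0 ((i : Int) - (j : Int)) with h | h <;>
        rcases min_choice ((s1.length : Int)) ((i : Int) - (j : Int) + (s2.length : Int)) with h' | h' <;>
        omega
    · have e1 : (max 0 ((i : Int) - (j : Int))).toNat + min i j = i := by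
        rcases max_choice 0 ((i : Int) - (j : Int)) with h | h <;> omega
      have e2 : ((max 0 ((i : Int) - (j : Int))) - ((i : Int) - (j : Int))).toNat + min i j = j := by
        rcases max_choice 0 ((i : Int) - (j : Int)) with h | h <;> omega
      rw [e1, e2]

-- ===== VERDICT (by name: the statement is the Claim_ definition above) =====
theorem max_consecutive_overlap_spec : Claim_equal_max_consecutive_overlap := by
  intro seq1 seq2 _
  unfold Spec_max_consecutive_overlap max_consecutive_overlap max_consecutive_overlap_alt
  have hA : (PySem.List.pyRange (-(seq2.toList.length : Int) + 1) (seq1.toList.length : Int) 1).foldl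
      (fun acc shift =>
        let st := (PySem.List.pyRange 0 (seq1.toList.length : Int) 1).foldl
          (pvStepA seq1.toList seq2.toList shift) (acc.1, acc.2, 0, 0)
        (st.1, st.2.1)) ((0 : Int), (0 : Int))
      = (((PySem.List.pyRange (-(seq2.toList.length : Int) + 1) (seq1.toList.length : Int) 1).flatMap
          (pvDiag seq1.toList seq2.toList)).foldl pvMax2 ((0 : Int), (0 : Int))) := by
    rw [← foldl_pvMax2_flat]
    apply PySem.List.foldl_congr_mem
    intro acc shift hmem
    rw [PySem.List.mem_pyRange_one] at hmem
    exact foldA_shift seq1.toList seq2.toList shift hmem.1 hmem.2 acc.1 acc.2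
  have hB := foldB_rows seq1.toList seq2.toList seq1.toList 0 List.drop_zero (by omega) 0 0
  have hmem : ∀ x : Int × Int,
      x ∈ (PySem.List.pyRange (-(seq2.toList.length : Int) + 1) (seq1.toList.length : Int) 1).flatMap
        (pvDiag seq1.toList seq2.toList)
      ↔ x ∈ pvRows seq1.toList seq2.toList 0 seq1.toList.length := by
    intro x
    rw [mem_diags, mem_pvRows]
    constructor
    · rintro ⟨i, j, hi, hj, hp⟩; exact ⟨i, j, hi, hj, by simpa using hp⟩
    · rintro ⟨k, j, hk, hj, hp⟩; exact ⟨k, j, hk, hj, by simpa using hp⟩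
  show (PySem.List.pyRange (-(seq2.toList.length : Int) + 1) (seq1.toList.length : Int) 1).foldl
      (fun acc shift =>
        let st := (PySem.List.pyRange 0 (seq1.toList.length : Int) 1).foldl
          (pvStepA seq1.toList seq2.toList shift) (acc.1, acc.2, 0, 0)
        (st.1, st.2.1)) ((0 : Int), (0 : Int))
      = _
  rw [hA, foldl_pvMax2_eq_of_mem_iff _ _ hmem]
  show _ = ((seq1.toList.foldl
      (fun acc a =>
        let st := (PySem.List.enumerate seq2.toList 0).foldl (pvStepB acc.2.2 a)
          ([], ((0 : Int), (0 : Int)), acc.1, acc.2.1)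
        (st.2.2.1, st.2.2.2, st.1))
      ((0 : Int), (0 : Int), pvPrevRow seq1.toList seq2.toList 0)).1,
    (seq1.toList.foldl
      (fun acc a =>
        let st := (PySem.List.enumerate seq2.toList 0).foldl (pvStepB acc.2.2 a)
          ([], ((0 : Int), (0 : Int)), acc.1, acc.2.1)
        (st.2.2.1, st.2.2.2, st.1))
      ((0 : Int), (0 : Int), pvPrevRow seq1.toList seq2.toList 0)).2.1)
  rw [hB]
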